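-- pv_equiv track=rewrite | github.com/Shadowfang116/CDS | backend/app/services/export_bank_pack.py | _get_decision
-- ===== SOURCE A (Python) =====
-- from typing import List, Dict, Any, Tuple
--
-- def _get_decision(exceptions: List[Dict[str, Any]]) -> Tuple[str, str]:
--     """
--     Determine the executive decision.
--
--     Returns (decision, color_code).
--     """
--     open_high = [e for e in exceptions if e.get("status") == "Open" and e.get("severity") == "High"]
--     waived_high = [e for e in exceptions if e.get("status") == "Waived" and e.get("severity") == "High"]
--
--     if not open_high and not waived_high:
--         return "PASS", "#28a745"
--     elif not open_high and waived_high: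
--         return "CONDITIONAL PASS", "#ffc107"
--     else:
--         return "FAIL", "#dc3545"
-- ===== SOURCE B (Python) =====
-- from typing import List, Dict, Any, Tuple
--
-- def _get_decision(exceptions: List[Dict[str, Any]]) -> Tuple[str, str]:
--     """Single early-exiting pass instead of two full filter passes."""
--     has_waived_high = False
--     for e in exceptions:
--         if e.get("severity") == "High":
--             status = e.get("status")
--             if status == "Open":
--                 return "FAIL", "#dc3545"
--             if status == "Waived":
--                 has_waived_high = True
--     if has_waived_high:
--         return "CONDITIONAL PASS", "#ffc107"
--     return "PASS", "#28a745"
-- ===== Notes on version B (the rewrite author's own statement) =====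
-- stated objective: alternative
-- what changed: Two full list-comprehension scans building filtered lists are replaced by one early-exiting loop over exceptions that keeps a single has_waived_high flag and returns FAIL immediately on the first Open+High entry.
import Mathlib
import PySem

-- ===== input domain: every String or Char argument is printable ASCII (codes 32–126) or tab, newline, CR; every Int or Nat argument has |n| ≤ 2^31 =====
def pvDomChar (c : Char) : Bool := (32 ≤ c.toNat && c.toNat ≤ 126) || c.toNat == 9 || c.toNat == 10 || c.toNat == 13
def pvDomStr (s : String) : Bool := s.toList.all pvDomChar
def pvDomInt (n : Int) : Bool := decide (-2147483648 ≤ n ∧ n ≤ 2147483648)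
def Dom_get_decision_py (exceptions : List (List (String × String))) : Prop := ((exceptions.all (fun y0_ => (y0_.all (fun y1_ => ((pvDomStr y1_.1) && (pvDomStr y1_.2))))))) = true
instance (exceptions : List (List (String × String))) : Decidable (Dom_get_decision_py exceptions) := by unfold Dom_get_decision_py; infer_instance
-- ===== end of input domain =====

-- B replaces A's two filter passes with one early-exiting loop carrying a waived-high flag (objective: alternative decomposition).

-- ===== PORT A =====
def get_decision_py (exceptions : List (List (String × String))) : String × String :=
  let open_high := exceptions.filter (fun e =>
    (PySem.Dict.get? (PySem.Dict.mk e) "status" == some "Open") && (PySem.Dict.get? (PySem.Dict.mk e) "severity" == some "High"))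
  let waived_high := exceptions.filter (fun e =>
    (PySem.Dict.get? (PySem.Dict.mk e) "status" == some "Waived") && (PySem.Dict.get? (PySem.Dict.mk e) "severity" == some "High"))
  if open_high.isEmpty && waived_high.isEmpty then ("PASS", "#28a745")
  else if open_high.isEmpty && !waived_high.isEmpty then ("CONDITIONAL PASS", "#ffc107")
  else ("FAIL", "#dc3545")

-- ===== PORT B =====
def altLoop : List (List (String × String)) → Bool → String × String
  | [], has_waived_high =>
      if has_waived_high then ("CONDITIONAL PASS", "#ffc107") else ("PASS", "#28a745")
  | e :: rest, has_waived_high =>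
      if PySem.Dict.get? (PySem.Dict.mk e) "severity" == some "High" then
        let status := PySem.Dict.get? (PySem.Dict.mk e) "status"
        if status == some "Open" then ("FAIL", "#dc3545")
        else altLoop rest (has_waived_high || (status == some "Waived"))
      else altLoop rest has_waived_high

def get_decision_py_alt (exceptions : List (List (String × String))) : String × String :=
  altLoop exceptions false

-- ===== PRECONDITION & SPEC =====
def Spec_get_decision_py (exceptions : List (List (String × String))) (out : String × String) : Prop := out = get_decision_py_alt exceptions
instance (exceptions : List (List (String × String))) (out : String × String) : Decidable (Spec_get_decision_py exceptions out) := by unfold Spec_get_decision_py; infer_instance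

-- ===== CLAIM (what is proved, stated in full; the proofs are below) =====
def Claim_equal_get_decision_py : Prop := ∀ (exceptions : List (List (String × String))), Dom_get_decision_py exceptions → Spec_get_decision_py exceptions (get_decision_py exceptions)

-- ===== LEMMAS AND PROOFS =====
lemma altLoop_eq (xs : List (List (String × String))) (w : Bool) :
    altLoop xs w =
      if xs.any (fun e => (PySem.Dict.get? (PySem.Dict.mk e) "status" == some "Open") && (PySem.Dict.get? (PySem.Dict.mk e) "severity" == some "High")) then ("FAIL", "#dc3545")
      else if w || xs.any (fun e => (PySem.Dict.get? (PySem.Dict.mk e) "status" == some "Waived") && (PySem.Dict.get? (PySem.Dict.mk e) "severity" == some "High")) then ("CONDITIONAL PASS", "#ffc107")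
      else ("PASS", "#28a745") := by
  induction xs generalizing w with
  | nil => simp [altLoop]
  | cons e rest ih =>
    simp only [altLoop, List.any_cons]
    by_cases hsev : PySem.Dict.get? (PySem.Dict.mk e) "severity" = some "High" <;>
    by_cases hst : PySem.Dict.get? (PySem.Dict.mk e) "status" = some "Open" <;>
      simp [hsev, hst, ih, Bool.or_assoc]

lemma isEmpty_filter_eq_not_any {α : Type} (p : α → Bool) (xs : List α) :
    (xs.filter p).isEmpty = !xs.any p := by
  induction xs with
  | nil => rfl
  | cons x rest ih =>
    by_cases h : p x <;> simp [List.filter, List.any_cons, h, ih]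

-- ===== VERDICT (by name: the statement is the Claim_ definition above) =====
theorem get_decision_py_spec : Claim_equal_get_decision_py := by
  intro xs _
  unfold Spec_get_decision_py get_decision_py get_decision_py_alt
  rw [altLoop_eq]
  simp only [isEmpty_filter_eq_not_any]
  by_cases ho : xs.any (fun e => (PySem.Dict.get? (PySem.Dict.mk e) "status" == some "Open") && (PySem.Dict.get? (PySem.Dict.mk e) "severity" == some "High")) <;>
  by_cases hw : xs.any (fun e => (PySem.Dict.get? (PySem.Dict.mk e) "status" == some "Waived") && (PySem.Dict.get? (PySem.Dict.mk e) "severity" == some "High")) <;>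
    simp [ho, hw]
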